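-- pv_equiv track=rewrite | github.com/Ramin8or/fullstack-nanodegree-vm | vagrant/tournament/tournament.py | pickNextPlayer
-- ===== SOURCE A (Python) =====
-- def pickNextPlayer(standings, picked_already, opponents_list=[]):
--     """Returns the index of next available player for pairing
--
--     Arg:
--       standings: list returned from playerStandings() function.
--       picked_already: list of booleans that denote whether the index in
--                        standings has already been picked.
--       opponents_list: list of opponents that should not play against.
--
--     Returns:
--       Function sets the picked_already[index] to True, when player is picked
--       returns the index into standings of player that is picked
--       -1 is returned if there is no more player left to select
--     """
--     for index in range(0, len(standings)):
--         if picked_already[index] == False: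
--             # Skip player if this player is in the opponents_list
--             if standings[index][0] in opponents_list:
--                 continue
--             # Return the index for this player, we're done
--             picked_already[index] = True
--             return index
--     # If there are any unpicked players left, return the first one before giving up
--     for index in range(0, len(picked_already)):
--         if picked_already[index] == False:
--             picked_already[index] = True
--             return index
--     # No one else left, giving up
--     return -1
-- ===== SOURCE B (Python) =====
-- # Single pass over picked_already with a running fallback, instead of A's two sequential scans.
-- def pickNextPlayer(standings, picked_already, opponents_list=[]):
--     fallback = -1
--     for index in range(len(picked_already)):
--         if picked_already[index] == False:
--             if fallback == -1:
--                 fallback = index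
--             if index < len(standings) and standings[index][0] not in opponents_list:
--                 picked_already[index] = True
--                 return index
--     if fallback != -1:
--         picked_already[fallback] = True
--         return fallback
--     return -1
-- ===== Notes on version B (the rewrite author's own statement) =====
-- stated objective: alternative
-- what changed: Replaces A's two sequential scans (eligible-player scan over standings, then unpicked-fallback scan over picked_already) with one single pass over picked_already maintaining a running fallback variable.
import Mathlib
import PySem

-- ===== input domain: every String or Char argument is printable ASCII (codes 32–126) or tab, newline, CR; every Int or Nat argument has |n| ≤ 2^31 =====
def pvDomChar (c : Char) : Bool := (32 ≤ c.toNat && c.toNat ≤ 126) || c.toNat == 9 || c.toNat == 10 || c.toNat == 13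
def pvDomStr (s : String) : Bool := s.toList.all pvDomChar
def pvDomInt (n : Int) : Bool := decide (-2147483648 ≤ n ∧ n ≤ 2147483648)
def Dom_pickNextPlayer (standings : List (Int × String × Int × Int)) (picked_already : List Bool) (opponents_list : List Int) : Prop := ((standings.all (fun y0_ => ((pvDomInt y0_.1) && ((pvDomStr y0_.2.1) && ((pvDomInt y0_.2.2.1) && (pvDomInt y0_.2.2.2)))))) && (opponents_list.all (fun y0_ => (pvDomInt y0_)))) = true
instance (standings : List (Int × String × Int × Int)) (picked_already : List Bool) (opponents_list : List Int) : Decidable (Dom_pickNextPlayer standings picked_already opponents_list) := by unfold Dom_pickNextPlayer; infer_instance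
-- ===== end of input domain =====

-- B makes A's two sequential scans one single pass with a running fallback (objective: alternative);
-- equivalence is about the return value (both also set the returned index True in picked_already).
-- Indexing note: inside Pre_ every index read is in range, so List.getD (default never used) is exact for Python's picked_already[i] / standings[i].

-- ===== PORT A =====
-- first loop of A: for index in range(0, len(standings)) — structural recursion over the index list
def pickA_loop1 (standings : List (Int × String × Int × Int)) (picked_already : List Bool) (opponents_list : List Int) : List Nat → Option Nat
  | [] => none
  | i :: rest =>
    if picked_already.getD i true = false then
      if opponents_list.contains (standings.getD i (0, "", 0, 0)).1 then
        pickA_loop1 standings picked_already opponents_list rest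
      else some i
    else pickA_loop1 standings picked_already opponents_list rest

-- second loop of A: for index in range(0, len(picked_already))
def pickA_loop2 (picked_already : List Bool) : List Nat → Option Nat
  | [] => none
  | i :: rest =>
    if picked_already.getD i true = false then some i
    else pickA_loop2 picked_already rest

def pickNextPlayer (standings : List (Int × String × Int × Int)) (picked_already : List Bool) (opponents_list : List Int) : Int :=
  match pickA_loop1 standings picked_already opponents_list (List.range standings.length) with
  | some j => (j : Int)
  | none =>
    match pickA_loop2 picked_already (List.range picked_already.length) with
    | some j => (j : Int)
    | none => -1

-- ===== PORT B =====
-- B's single loop: for index in range(len(picked_already)) with a running fallback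
def pickB_loop (standings : List (Int × String × Int × Int)) (picked_already : List Bool) (opponents_list : List Int) : List Nat → Int → Int
  | [], fallback => if fallback ≠ -1 then fallback else -1
  | i :: rest, fallback =>
    if picked_already.getD i true = false then
      -- fallback update of Source B folded into the recursive call (the updated value is only used there)
      if i < standings.length ∧ ¬ opponents_list.contains (standings.getD i (0, "", 0, 0)).1 then (i : Int)
      else pickB_loop standings picked_already opponents_list rest
        (if fallback = -1 then (i : Int) else fallback)
    else pickB_loop standings picked_already opponents_list rest fallback

def pickNextPlayer_alt (standings : List (Int × String × Int × Int)) (picked_already : List Bool) (opponents_list : List Int) : Int :=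
  pickB_loop standings picked_already opponents_list (List.range picked_already.length) (-1)

-- ===== PRECONDITION & SPEC =====
-- Pre_ admits exactly the inputs on which Python A returns: either picked_already covers standings'
-- range, or some unpicked non-opponent player lies within picked_already's range (A returns before
-- reaching the out-of-range read); otherwise A raises IndexError.
def Pre_pickNextPlayer (standings : List (Int × String × Int × Int)) (picked_already : List Bool) (opponents_list : List Int) : Prop :=
  standings.length ≤ picked_already.length ∨
    ∃ j ∈ List.range picked_already.length,
      picked_already.getD j true = false ∧ ¬ opponents_list.contains (standings.getD j (0, "", 0, 0)).1
instance (standings : List (Int × String × Int × Int)) (picked_already : List Bool) (opponents_list : List Int) : Decidable (Pre_pickNextPlayer standings picked_already opponents_list) := by unfold Pre_pickNextPlayer; infer_instance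

def pvWitness_pickNextPlayer : (List (Int × String × Int × Int)) × List Bool × List Int :=
  ([(3, "a", 1, 2), (5, "b", 0, 1)], [false, false], [3])

def Spec_pickNextPlayer (standings : List (Int × String × Int × Int)) (picked_already : List Bool) (opponents_list : List Int) (out : Int) : Prop := out = pickNextPlayer_alt standings picked_already opponents_list
instance (standings : List (Int × String × Int × Int)) (picked_already : List Bool) (opponents_list : List Int) (out : Int) : Decidable (Spec_pickNextPlayer standings picked_already opponents_list out) := by unfold Spec_pickNextPlayer; infer_instance

-- ===== CLAIM (what is proved, stated in full; the proofs are below) =====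
def Claim_equal_pickNextPlayer : Prop := ∀ (standings : List (Int × String × Int × Int)) (picked_already : List Bool) (opponents_list : List Int), Dom_pickNextPlayer standings picked_already opponents_list → Pre_pickNextPlayer standings picked_already opponents_list → Spec_pickNextPlayer standings picked_already opponents_list (pickNextPlayer standings picked_already opponents_list)
-- ===== LEMMAS AND PROOFS =====

-- A's first loop finds nothing among indices beyond picked_already's range (getD defaults to true there)
lemma loop1_none (standings : List (Int × String × Int × Int)) (picked_already : List Bool) (opponents_list : List Int)
    (l : List Nat) (h : ∀ j ∈ l, picked_already.length ≤ j) :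
    pickA_loop1 standings picked_already opponents_list l = none := by
  induction l with
  | nil => rfl
  | cons i rest ih =>
    have hi : picked_already.getD i true = true :=
      List.getD_eq_default _ _ (h i (List.mem_cons_self))
    rw [pickA_loop1, hi]
    exact (if_neg (by simp)).trans (ih (fun j hj => h j (List.mem_cons_of_mem _ hj)))

-- A's first loop advances past a non-eligible index i (picked, out of standings' range, or an opponent)
lemma loop1_step (standings : List (Int × String × Int × Int)) (picked_already : List Bool) (opponents_list : List Int)
    (i : Nat)
    (h : ¬ (picked_already.getD i true = false ∧ i < standings.length ∧
        ¬ opponents_list.contains (standings.getD i (0, "", 0, 0)).1)) :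
    pickA_loop1 standings picked_already opponents_list (List.range' i (standings.length - i)) =
      pickA_loop1 standings picked_already opponents_list (List.range' (i + 1) (standings.length - (i + 1))) := by
  by_cases hlt : i < standings.length
  · have hst : standings.length - i = (standings.length - (i + 1)) + 1 := by omega
    rw [hst, List.range'_succ, pickA_loop1]
    cases hp : picked_already.getD i true with
    | false =>
      have hop : opponents_list.contains (standings.getD i (0, "", 0, 0)).1 = true := by
        by_contra hc
        exact h ⟨hp, hlt, by simpa using hc⟩
      rw [if_pos rfl, if_pos hop]
    | true => rw [if_neg (by simp)]
  · have e0 : standings.length - i = 0 := by omega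
    have e1 : standings.length - (i + 1) = 0 := by omega
    rw [e0, e1]
    rfl

-- key invariant: B's single pass from index i with fallback f computes A's two-scan result from i
lemma key (standings : List (Int × String × Int × Int)) (picked_already : List Bool) (opponents_list : List Int) :
    ∀ (k i : Nat) (f : Int), picked_already.length = i + k →
    pickB_loop standings picked_already opponents_list (List.range' i k) f =
      match pickA_loop1 standings picked_already opponents_list (List.range' i (standings.length - i)) with
      | some j => (j : Int)
      | none =>
        if f = -1 then
          match pickA_loop2 picked_already (List.range' i k) with
          | some j => (j : Int)
          | none => -1
        else f := by
  intro k
  induction k with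
  | zero =>
    intro i f hk
    rw [loop1_none _ _ _ _ (fun j hj => by have := List.mem_range'.1 hj; omega)]
    show (if f ≠ -1 then f else -1) = _
    by_cases hf : f = -1 <;> simp [hf, pickA_loop2]
  | succ k ih =>
    intro i f hk
    rw [List.range'_succ, pickB_loop, pickA_loop2]
    cases hp : picked_already.getD i true with
    | false =>
      rw [if_pos rfl, if_pos rfl]
      by_cases hs : i < standings.length ∧
          ¬ opponents_list.contains (standings.getD i (0, "", 0, 0)).1
      · -- eligible index: both A's first scan and B return i
        have hst : standings.length - i = (standings.length - (i + 1)) + 1 := by omega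
        rw [if_pos hs, hst, List.range'_succ, pickA_loop1, hp, if_pos rfl,
          if_neg (by simpa using hs.2)]
      · -- unpicked but not eligible: B records the fallback, A's scans both advance
        rw [if_neg hs, ih (i + 1) _ (by omega),
          loop1_step standings picked_already opponents_list i (fun hc => hs hc.2)]
        cases pickA_loop1 standings picked_already opponents_list
            (List.range' (i + 1) (standings.length - (i + 1))) with
        | some j => rfl
        | none =>
          have hi : (i : Int) ≠ -1 := by omega
          by_cases hf : f = -1 <;> simp [hf, hi]
    | true =>
      -- picked index: every scan skips it
      have hne : ¬(true = false) := by simp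
      rw [if_neg hne, if_neg hne, ih (i + 1) f (by omega),
        loop1_step standings picked_already opponents_list i
          (fun hc => by rw [hp] at hc; exact Bool.noConfusion hc.1)]

-- ===== VERDICT (by name: the statement is the Claim_ definition above) =====
theorem pickNextPlayer_spec : Claim_equal_pickNextPlayer := by
  intro st pk op _ _
  unfold Spec_pickNextPlayer pickNextPlayer pickNextPlayer_alt
  rw [List.range_eq_range', List.range_eq_range',
    key st pk op pk.length 0 (-1) (by omega)]
  simp
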